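-- pv_equiv track=rewrite | github.com/aliclark/irctail | irssilib.py | pick_color
-- ===== SOURCE A (Python) =====
-- pallette = {'white': '00', 'blue': '10', 'green': '09', 'cyan': '11', 'red': '04', 'magenta': '13', 'yellow': '08', 'grey': '14'}
--
-- def ch(c):
--     return '\x03' + pallette[c] + ',99'
--
-- def pick_color(counts, hits):
--     minc = None
--     minn = None
--     minh = None
--
--     for (k, v) in [(k, counts[k] if k in counts else 0) for k in pallette.keys()]:
--         # Modified the color picking algorithm from basic round-robin:
--         # In case of ties, give the color which appears to be least commonly used.
--         # This is roughly as good as it gets, since we have no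
--         # information about the channel we are assigning a new colour
--         # for.
--         # Could be slightly cleverer about resilience against a
--         # one-off burst on a different colour, but meh.
--         # This will also happily assign a colour which has been seen
--         # in the last line on a different channel, but that's probably coincidence.
--         # Perhaps this should consider consecutive lines from the same
--         # channel to be a single hit.
--
--         if ((minn == None) or (v < minn) or
--             ((v == minn) and (minh != None) and ((ch(k) not in hits) or (hits[ch(k)] < minh)))):
--             minc = k
--             minn = v
--             if ch(k) in hits:
--                 minh = hits[ch(k)]
--             else:
--                 minh = None
--
--     if not minc in counts:
--         counts[minc] = 0
--
--     counts[minc] += 1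
--     return ch(minc)
-- ===== SOURCE B (Python) =====
-- pallette = {'white': '00', 'blue': '10', 'green': '09', 'cyan': '11', 'red': '04', 'magenta': '13', 'yellow': '08', 'grey': '14'}
--
-- def ch(c):
--     return '\x03' + pallette[c] + ',99'
--
-- def pick_color(counts, hits):
--     # Stage 1: the least-used count over the palette.
--     m = min(counts.get(k, 0) for k in pallette)
--     # Stage 2: all palette keys with that count, in palette order.
--     cands = [k for k in pallette if counts.get(k, 0) == m]
--     # Stage 3: prefer the first candidate whose color never appeared in hits;
--     # otherwise the candidate with the fewest hits (first on ties).
--     minc = next((k for k in cands if ch(k) not in hits), None)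
--     if minc is None:
--         minc = min(cands, key=lambda k: hits[ch(k)])
--     counts[minc] = counts.get(minc, 0) + 1
--     return ch(minc)
-- ===== Notes on version B (the rewrite author's own statement) =====
-- stated objective: alternative
-- what changed: Replaces A's single-pass argmin with a stateful 3-option accumulator by a staged pipeline: compute the global minimum count, filter the tied candidates, then pick the first hits-free candidate or else the min-by-hits candidate.
import Mathlib
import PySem

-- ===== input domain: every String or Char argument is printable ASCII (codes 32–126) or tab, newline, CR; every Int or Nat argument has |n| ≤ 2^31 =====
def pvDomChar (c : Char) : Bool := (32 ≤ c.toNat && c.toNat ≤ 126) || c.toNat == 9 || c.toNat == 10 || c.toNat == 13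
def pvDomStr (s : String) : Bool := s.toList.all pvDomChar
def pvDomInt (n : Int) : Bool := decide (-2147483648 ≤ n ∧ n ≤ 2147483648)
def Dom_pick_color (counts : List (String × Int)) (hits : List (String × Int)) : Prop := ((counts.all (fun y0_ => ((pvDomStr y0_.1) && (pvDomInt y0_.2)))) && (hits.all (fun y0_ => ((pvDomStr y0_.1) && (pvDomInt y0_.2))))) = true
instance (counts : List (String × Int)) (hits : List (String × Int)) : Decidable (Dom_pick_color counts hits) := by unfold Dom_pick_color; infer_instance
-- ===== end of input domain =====

-- B replaces A's single-pass argmin (option-triple accumulator) by a staged pipeline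
-- (min count, filter ties, first hits-free else min-by-hits); both Pythons also increment
-- counts[minc] in place identically — the equivalence proved here is about the return value.


-- ===== PORT A =====
-- module-level dict `pallette` (insertion order) and helper `ch`, shared by both Pythons
def pallette : List (String × String) :=
  [("white","00"),("blue","10"),("green","09"),("cyan","11"),
   ("red","04"),("magenta","13"),("yellow","08"),("grey","14")]

-- ch(c) = '\x03' + pallette[c] + ',99'; only ever called on palette keys, where the
-- lookup succeeds, so the .getD "" default is never used
-- dict lookup on an association list: first match (the Lean image of a Python dict)
def dget (d : List (String × String)) (k : String) : Option String := List.lookup k d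

def dgetI (d : List (String × Int)) (k : String) : Option Int := List.lookup k d

def ch (c : String) : String := "\x03" ++ (dget pallette c).getD "" ++ ",99"

-- one iteration of A's loop over (k, v); state = (minc, minn, minh)
def pickStep (hits : List (String × Int)) (st : Option String × Option Int × Option Int)
    (kv : String × Int) : Option String × Option Int × Option Int :=
  let cond : Bool :=
    match st.2.1 with
    | none => true
    | some minn =>
      decide (kv.2 < minn) ||
      (decide (kv.2 = minn) && st.2.2.isSome &&
        ((dgetI hits (ch kv.1)).isNone ||
         (match dgetI hits (ch kv.1), st.2.2 with
          | some h, some minh => decide (h < minh)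
          | _, _ => false)))
  if cond then (kv.1, kv.2, dgetI hits (ch kv.1)) else st

def pick_color (counts : List (String × Int)) (hits : List (String × Int)) : String :=
  let pairs := pallette.map (fun kv => (kv.1, (dgetI counts kv.1).getD 0))
  let st := pairs.foldl (pickStep hits) (none, none, none)
  match st.1 with
  | some k => ch k
  | none => ""   -- unreachable: pallette is nonempty

-- ===== PORT B =====
def pick_color_alt (counts : List (String × Int)) (hits : List (String × Int)) : String :=
  let keys := pallette.map Prod.fst
  let cnt : String → Int := fun k => (dgetI counts k).getD 0
  -- m = min(counts.get(k, 0) for k in pallette); keys is nonempty so min? is some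
  let m : Int := (PySem.List.min? (keys.map cnt) (fun x => x)).getD 0
  let cands := keys.filter (fun k => cnt k == m)
  -- next((k for k in cands if ch(k) not in hits), None)
  let first := cands.find? (fun k => (dgetI hits (ch k)).isNone)
  let minc : Option String :=
    match first with
    | some k => some k
    -- min(cands, key=lambda k: hits[ch(k)]): every cand is in hits here, so .getD 0 is exact
    | none => PySem.List.min? cands (fun k => (dgetI hits (ch k)).getD 0)
  match minc with
  | some k => ch k
  | none => ""   -- unreachable: cands is nonempty

-- ===== PRECONDITION & SPEC =====
def Spec_pick_color (counts : List (String × Int)) (hits : List (String × Int)) (out : String) : Prop := out = pick_color_alt counts hits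
instance (counts : List (String × Int)) (hits : List (String × Int)) (out : String) : Decidable (Spec_pick_color counts hits out) := by unfold Spec_pick_color; infer_instance

-- ===== CLAIM (what is proved, stated in full; the proofs are below) =====
def Claim_equal_pick_color : Prop := ∀ (counts : List (String × Int)) (hits : List (String × Int)), Dom_pick_color counts hits → Spec_pick_color counts hits (pick_color counts hits)

-- ===== LEMMAS AND PROOFS =====

-- the strict "better than" order A's scan realises: smaller count first, then
-- hits-free before hit, then smaller hit count
def kltb (f : String → Int) (g : String → Option Int) (y x : String) : Bool :=
  decide (f y < f x) ||
  (decide (f y = f x) &&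
    ((g y).isNone && (g x).isSome ||
     (match g y, g x with
      | some a, some b => decide (a < b)
      | _, _ => false)))

def minFrom (f : String → Int) (g : String → Option Int) (x : String) (l : List String) : String :=
  l.foldl (fun b y => if kltb f g y b then y else b) x

theorem kltb_trans (f : String → Int) (g : String → Option Int) (a b c : String)
    (h1 : kltb f g a b = true) (h2 : kltb f g b c = true) : kltb f g a c = true := by
  unfold kltb at *
  cases ga : g a <;> cases gb : g b <;> cases gc : g c <;>
    simp [ga, gb, gc] at * <;> omega

theorem kltb_cross (f : String → Int) (g : String → Option Int) (z x y : String)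
    (h1 : kltb f g z x = true) (h2 : kltb f g y x = false) : kltb f g z y = true := by
  unfold kltb at *
  cases gz : g z <;> cases gx : g x <;> cases gy : g y <;>
    simp [gz, gx, gy] at * <;> omega

-- the scan result is the FIRST minimum: strictly better than everything before it,
-- not strictly beaten by anything after it
theorem minFrom_spec (f : String → Int) (g : String → Option Int) :
    ∀ (l : List String) (x : String), ∃ p s, x :: l = p ++ minFrom f g x l :: s ∧
      (∀ y ∈ p, kltb f g (minFrom f g x l) y = true) ∧
      (∀ y ∈ s, kltb f g y (minFrom f g x l) = false) := by
  intro l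
  induction l with
  | nil => intro x; exact ⟨[], [], by simp [minFrom], by simp, by simp⟩
  | cons y l ih =>
    intro x
    have hstep : minFrom f g x (y :: l) = minFrom f g (if kltb f g y x then y else x) l := by
      simp [minFrom, List.foldl_cons]
    by_cases hyx : kltb f g y x = true
    · obtain ⟨p, s, hdec, hp, hs⟩ := ih y
      rw [hstep, if_pos hyx]
      refine ⟨x :: p, s, ?_, ?_, hs⟩
      · rw [List.cons_append, ← hdec]
      · intro w hw
        rcases List.mem_cons.mp hw with rfl | hw
        · cases p with
          | nil =>
            have hyz : y = minFrom f g y l := ((by simpa [List.cons.injEq] using hdec : y = minFrom f g y l ∧ l = s)).1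
            rw [← hyz]; exact hyx
          | cons p0 p' =>
            have hp0 : p0 = y := by
              have h := hdec; rw [List.cons_append] at h
              exact ((List.cons.injEq _ _ _ _).mp h).1.symm
            exact kltb_trans f g _ y w (hp0 ▸ hp p0 (by simp)) hyx
        · exact hp w hw
    · have hyx' : kltb f g y x = false := by simpa using hyx
      obtain ⟨p, s, hdec, hp, hs⟩ := ih x
      rw [hstep, if_neg (by simp [hyx'])]
      cases p with
      | nil =>
        have hxz : x = minFrom f g x l ∧ l = s := by simpa [List.cons.injEq] using hdec
        refine ⟨[], y :: s, by simp [← hxz.1, ← hxz.2], by simp, ?_⟩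
        intro w hw
        rcases List.mem_cons.mp hw with rfl | hw
        · rw [← hxz.1]; exact hyx'
        · exact hs w hw
      | cons p0 p' =>
        have h := hdec; rw [List.cons_append] at h
        have hx0 : p0 = x := ((List.cons.injEq _ _ _ _).mp h).1.symm
        have hl : l = p' ++ minFrom f g x l :: s := ((List.cons.injEq _ _ _ _).mp h).2
        have hzx : kltb f g (minFrom f g x l) x = true := hx0 ▸ hp p0 (by simp)
        refine ⟨x :: y :: p', s, by rw [List.cons_append, List.cons_append, ← hl], ?_, hs⟩
        intro w hw
        rcases List.mem_cons.mp hw with rfl | hw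
        · exact hzx
        · rcases List.mem_cons.mp hw with rfl | hw
          · exact kltb_cross f g _ x w hzx hyx'
          · exact hp w (by simp [hw])

-- small consequences of kltb, proved by case analysis on the hit lookups
theorem kltb_le (f : String → Int) (g : String → Option Int) (z y : String)
    (h : kltb f g z y = true) : f z ≤ f y := by
  unfold kltb at h
  cases gz : g z <;> cases gy : g y <;> simp [gz, gy] at h <;> omega

theorem kltb_not_lt (f : String → Int) (g : String → Option Int) (z y : String)
    (h : kltb f g y z = false) : f z ≤ f y := by
  unfold kltb at h
  cases gz : g z <;> cases gy : g y <;> simp [gz, gy] at h <;> omega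

theorem kltb_tie_none (f : String → Int) (g : String → Option Int) (z y : String)
    (h : kltb f g z y = true) (hf : f y = f z) (hz : g z = none) : (g y).isSome = true := by
  unfold kltb at h
  cases gy : g y <;> simp [hz, gy, hf] at h ⊢

theorem kltb_tie_some (f : String → Int) (g : String → Option Int) (z y : String) (a : Int)
    (h : kltb f g z y = true) (hf : f y = f z) (hz : g z = some a) :
    ∃ b, g y = some b ∧ a < b := by
  unfold kltb at h
  cases gy : g y <;> simp [hz, gy, hf] at h ⊢ <;> exact h

theorem kltb_tie_false (f : String → Int) (g : String → Option Int) (z y : String) (a : Int)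
    (h : kltb f g y z = false) (hf : f y = f z) (hz : g z = some a) :
    ∃ b, g y = some b ∧ a ≤ b := by
  unfold kltb at h
  cases gy : g y <;> simp [hz, gy, hf] at h ⊢ <;> exact h

-- one A-step at the canonical state is exactly a kltb comparison
theorem stepA_eq (hits : List (String × Int)) (f : String → Int) (x k : String) :
    pickStep hits (some x, some (f x), dgetI hits (ch x)) (k, f k) =
      if kltb f (fun t => dgetI hits (ch t)) k x
      then (some k, some (f k), dgetI hits (ch k))
      else (some x, some (f x), dgetI hits (ch x)) := by
  cases hx : dgetI hits (ch x) <;> cases hk : dgetI hits (ch k) <;>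
    simp [pickStep, kltb, hx, hk]

-- A's whole loop from the canonical state computes minFrom
theorem foldA (counts hits : List (String × Int)) :
    ∀ (l : List String) (x : String),
      List.foldl (pickStep hits)
          (some x, some ((dgetI counts x).getD 0), dgetI hits (ch x))
          (l.map (fun k => (k, (dgetI counts k).getD 0)))
        = (some (minFrom (fun k => (dgetI counts k).getD 0) (fun t => dgetI hits (ch t)) x l),
           some ((dgetI counts (minFrom (fun k => (dgetI counts k).getD 0) (fun t => dgetI hits (ch t)) x l)).getD 0),
           dgetI hits (ch (minFrom (fun k => (dgetI counts k).getD 0) (fun t => dgetI hits (ch t)) x l))) := by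
  intro l
  induction l with
  | nil => intro x; simp [minFrom]
  | cons k l ih =>
    intro x
    simp only [List.map_cons, List.foldl_cons]
    rw [stepA_eq hits (fun k => (dgetI counts k).getD 0) x k]
    have hmf : minFrom (fun k => (dgetI counts k).getD 0) (fun t => dgetI hits (ch t)) x (k :: l) =
        minFrom (fun k => (dgetI counts k).getD 0) (fun t => dgetI hits (ch t))
          (if kltb (fun k => (dgetI counts k).getD 0) (fun t => dgetI hits (ch t)) k x then k else x) l := by
      simp [minFrom]
    rw [hmf]
    by_cases h : kltb (fun k => (dgetI counts k).getD 0) (fun t => dgetI hits (ch t)) k x = true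
    · rw [if_pos h, if_pos h]; exact ih k
    · rw [if_neg h, if_neg h]; exact ih x

-- PySem.List.min? is this fold (definitionally)
def minF {α : Type} (key : α → Int) (acc : Option α) (x : α) : Option α :=
  match acc with
  | none => some x
  | some m => if key x < key m then some x else some m

theorem min?_eq_foldl {α : Type} (xs : List α) (key : α → Int) :
    PySem.List.min? xs key = xs.foldl (minF key) none := by
  unfold PySem.List.min?
  congr 1

theorem minF_keep {α : Type} (key : α → Int) (z : α) :
    ∀ (s : List α), (∀ y ∈ s, key z ≤ key y) → s.foldl (minF key) (some z) = some z := by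
  intro s
  induction s with
  | nil => intro _; rfl
  | cons y s ih =>
    intro h
    rw [List.foldl_cons]
    have : minF key (some z) y = some z := by
      simp only [minF]
      rw [if_neg (by have := h y (by simp); omega)]
    rw [this]
    exact ih (fun w hw => h w (by simp [hw]))

-- min(…, key=…) returns the FIRST extremal element
theorem min?_first {α : Type} (p s : List α) (z : α) (key : α → Int)
    (hp : ∀ y ∈ p, key z < key y) (hs : ∀ y ∈ s, key z ≤ key y) :
    PySem.List.min? (p ++ z :: s) key = some z := by
  rw [min?_eq_foldl, List.foldl_append]
  have hzstep : ∀ acc, (acc = none ∨ ∃ c, acc = some c ∧ c ∈ p) →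
      List.foldl (minF key) acc (z :: s) = some z := by
    intro acc hacc
    rw [List.foldl_cons]
    rcases hacc with rfl | ⟨c, rfl, hc⟩
    · exact minF_keep key z s hs
    · have : minF key (some c) z = some z := by
        simp only [minF]
        rw [if_pos (hp c hc)]
      rw [this]
      exact minF_keep key z s hs
  rcases hacc : List.foldl (minF key) none p with _ | c
  · exact hzstep none (Or.inl rfl)
  · refine hzstep (some c) (Or.inr ⟨c, rfl, ?_⟩)
    have : PySem.List.min? p key = some c := by rw [min?_eq_foldl]; exact hacc
    exact PySem.List.min?_mem this

-- A returns ch of the scan minimum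
theorem pick_color_eq_minFrom (counts hits : List (String × Int)) :
    pick_color counts hits =
      ch (minFrom (fun k => (dgetI counts k).getD 0) (fun t => dgetI hits (ch t)) "white"
        ["blue","green","cyan","red","magenta","yellow","grey"]) := by
  unfold pick_color
  show (match (List.foldl (pickStep hits) (none, none, none)
      (List.map (fun kv => (kv.1, (dgetI counts kv.1).getD 0)) pallette)).1 with
    | some k => ch k
    | none => "") = _
  have hpairs : pallette.map (fun kv => (kv.1, (dgetI counts kv.1).getD 0)) =
      ("white", (dgetI counts "white").getD 0) ::
        (["blue","green","cyan","red","magenta","yellow","grey"].map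
          (fun k => (k, (dgetI counts k).getD 0))) := rfl
  rw [hpairs, List.foldl_cons]
  have h1 : pickStep hits (none, none, none) ("white", (dgetI counts "white").getD 0)
      = (some "white", some ((dgetI counts "white").getD 0), dgetI hits (ch "white")) := rfl
  rw [h1, foldA]

-- B returns ch z for any z that is a "first minimum" of the palette keys
theorem pick_color_alt_eq (counts hits : List (String × Int)) (z : String) (p s : List String)
    (hdec : "white" :: ["blue","green","cyan","red","magenta","yellow","grey"] = p ++ z :: s)
    (hp : ∀ y ∈ p, kltb (fun k => (dgetI counts k).getD 0) (fun t => dgetI hits (ch t)) z y = true)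
    (hs : ∀ y ∈ s, kltb (fun k => (dgetI counts k).getD 0) (fun t => dgetI hits (ch t)) y z = false) :
    pick_color_alt counts hits = ch z := by
  have hK : List.map Prod.fst pallette = p ++ z :: s := hdec
  unfold pick_color_alt
  simp only []
  rw [hK]
  -- every key's count is at least z's
  have hzle : ∀ y ∈ p ++ z :: s, (dgetI counts z).getD 0 ≤ (dgetI counts y).getD 0 := by
    intro y hy
    rcases List.mem_append.mp hy with hy | hy
    · exact kltb_le _ _ _ _ (hp y hy)
    · rcases List.mem_cons.mp hy with rfl | hy
      · exact le_refl _
      · exact kltb_not_lt _ _ _ _ (hs y hy)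
  -- stage 1: the minimum count is z's count
  have hmin : PySem.List.min? (List.map (fun k => (dgetI counts k).getD 0) (p ++ z :: s))
      (fun x => x) = some ((dgetI counts z).getD 0) := by
    rcases h0 : PySem.List.min? (List.map (fun k => (dgetI counts k).getD 0) (p ++ z :: s))
        (fun x => x) with _ | v
    · rw [PySem.List.min?_eq_none_iff] at h0
      simp at h0
    · obtain ⟨y, hy, hyv⟩ := List.mem_map.mp (PySem.List.min?_mem h0)
      have h2 := PySem.List.min?_isMin h0 ((dgetI counts z).getD 0)
        (List.mem_map_of_mem (by simp))
      have h3 := hzle y hy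
      have : v = (dgetI counts z).getD 0 := by simp at h2; omega
      rw [this]
  rw [hmin]
  simp only [Option.getD_some]
  -- stage 2: the tied candidates around z
  have hfilter : List.filter (fun k => (dgetI counts k).getD 0 == (dgetI counts z).getD 0)
        (p ++ z :: s)
      = List.filter (fun k => (dgetI counts k).getD 0 == (dgetI counts z).getD 0) p ++
          z :: List.filter (fun k => (dgetI counts k).getD 0 == (dgetI counts z).getD 0) s := by
    rw [List.filter_append, List.filter_cons_of_pos (by simp)]
  rw [hfilter]
  -- stage 3
  rcases hgz : dgetI hits (ch z) with _ | hz
  · -- z's color is hits-free: it is the first hits-free candidate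
    have hfind : List.find? (fun k => (dgetI hits (ch k)).isNone)
        (List.filter (fun k => (dgetI counts k).getD 0 == (dgetI counts z).getD 0) p ++
          z :: List.filter (fun k => (dgetI counts k).getD 0 == (dgetI counts z).getD 0) s)
        = some z := by
      rw [List.find?_append]
      have h1 : List.find? (fun k => (dgetI hits (ch k)).isNone)
          (List.filter (fun k => (dgetI counts k).getD 0 == (dgetI counts z).getD 0) p) = none := by
        rw [List.find?_eq_none]
        intro y hy
        have hyp := List.mem_filter.mp hy
        have hfe : (dgetI counts y).getD 0 = (dgetI counts z).getD 0 := by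
          simpa using hyp.2
        have hsome := kltb_tie_none (fun k => (dgetI counts k).getD 0)
          (fun t => dgetI hits (ch t)) z y (hp y hyp.1) hfe hgz
        rcases hgy : dgetI hits (ch y) with _ | b
        · simp only [hgy] at hsome; simp at hsome
        · simp

      rw [h1, Option.none_or, List.find?_cons_of_pos (by simp [hgz])]
    rw [hfind]
  · -- every candidate's color is in hits: z has the fewest hits, first on ties
    have hfind : List.find? (fun k => (dgetI hits (ch k)).isNone)
        (List.filter (fun k => (dgetI counts k).getD 0 == (dgetI counts z).getD 0) p ++
          z :: List.filter (fun k => (dgetI counts k).getD 0 == (dgetI counts z).getD 0) s)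
        = none := by
      rw [List.find?_eq_none]
      intro y hy
      rcases List.mem_append.mp hy with hy | hy
      · have hyp := List.mem_filter.mp hy
        have hfe : (dgetI counts y).getD 0 = (dgetI counts z).getD 0 := by simpa using hyp.2
        obtain ⟨b, hb, _⟩ := kltb_tie_some (fun k => (dgetI counts k).getD 0)
          (fun t => dgetI hits (ch t)) z y hz (hp y hyp.1) hfe hgz
        simp [hb]
      · rcases List.mem_cons.mp hy with rfl | hy
        · simp [hgz]
        · have hyp := List.mem_filter.mp hy
          have hfe : (dgetI counts y).getD 0 = (dgetI counts z).getD 0 := by simpa using hyp.2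
          obtain ⟨b, hb, _⟩ := kltb_tie_false (fun k => (dgetI counts k).getD 0)
            (fun t => dgetI hits (ch t)) z y hz (hs y hyp.1) hfe hgz
          simp [hb]
    rw [hfind]
    have hmin2 : PySem.List.min?
        (List.filter (fun k => (dgetI counts k).getD 0 == (dgetI counts z).getD 0) p ++
          z :: List.filter (fun k => (dgetI counts k).getD 0 == (dgetI counts z).getD 0) s)
        (fun k => (dgetI hits (ch k)).getD 0) = some z := by
      apply min?_first
      · intro y hy
        have hyp := List.mem_filter.mp hy
        have hfe : (dgetI counts y).getD 0 = (dgetI counts z).getD 0 := by simpa using hyp.2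
        obtain ⟨b, hb, hlt⟩ := kltb_tie_some (fun k => (dgetI counts k).getD 0)
          (fun t => dgetI hits (ch t)) z y hz (hp y hyp.1) hfe hgz
        simp [hb, hgz, hlt]
      · intro y hy
        have hyp := List.mem_filter.mp hy
        have hfe : (dgetI counts y).getD 0 = (dgetI counts z).getD 0 := by simpa using hyp.2
        obtain ⟨b, hb, hle⟩ := kltb_tie_false (fun k => (dgetI counts k).getD 0)
          (fun t => dgetI hits (ch t)) z y hz (hs y hyp.1) hfe hgz
        simp [hb, hgz, hle]
    rw [hmin2]
-- ===== VERDICT (by name: the statement is the Claim_ definition above) =====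
theorem pick_color_spec : Claim_equal_pick_color := by
  intro counts hits _
  unfold Spec_pick_color
  obtain ⟨p, s, hdec, hp, hs⟩ :=
    minFrom_spec (fun k => (dgetI counts k).getD 0) (fun t => dgetI hits (ch t))
      ["blue","green","cyan","red","magenta","yellow","grey"] "white"
  rw [pick_color_eq_minFrom counts hits, pick_color_alt_eq counts hits _ p s hdec hp hs]
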